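-- pv_equiv track=rewrite | github.com/griffin-leonard/6.00-Psets | 6-0001_ps3/document_distance.py | get_most_frequent_words
-- ===== SOURCE A (Python) =====
-- def get_most_frequent_words(dict1, dict2):
--     """
--     Args:
--         dict1: frequency dictionary for one text
--         dict2: frequency dictionary for another text
--     Returns:
--         list of the most frequent word(s) shared between the 2 texts
--
--         The most frequent word is defined as the combined
--         frequency of shared words across both texts.
--         If multiple words share the same highest frequency, return
--         all of them in alphabetical order.
--     """
--     #creates a dictionary (freq) including all the words in both dict1 and/or dict2,
--     #adding the values for each word that occurs in both dict1 and dict2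
--     freq = dict1.copy()
--     for i in dict2.keys():
--         if i in freq:
--             freq[i] += dict2[i]
--         #if the words aren't in dict1, add the word to freq
--         else:
--             freq[i] = dict2[i]
--
--     #creats a list of all word with the highest values (frequency)
--     maxValue = max(freq.values())
--     freqWord = []
--     for i in freq.keys():
--         if freq[i] == maxValue:
--             freqWord.append(i)
--     return sorted(freqWord)
-- ===== SOURCE B (Python) =====
-- def get_most_frequent_words(dict1, dict2):
--     """Single pass over the union of keys, keeping a running best value and tied words."""
--     keys = list(dict1) + [k for k in dict2 if k not in dict1]
--     best = None
--     words = []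
--     for k in keys:
--         c = dict1.get(k, 0) + dict2.get(k, 0)
--         if best is None or c > best:
--             best = c
--             words = [k]
--         elif c == best:
--             words.append(k)
--     return sorted(words)
-- ===== Notes on version B (the rewrite author's own statement) =====
-- stated objective: alternative
-- what changed: Instead of building a merged frequency dict and then taking max + filter in two further passes, B does one fused pass over the union of keys maintaining a running best value and the list of tied words.
import Mathlib
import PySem

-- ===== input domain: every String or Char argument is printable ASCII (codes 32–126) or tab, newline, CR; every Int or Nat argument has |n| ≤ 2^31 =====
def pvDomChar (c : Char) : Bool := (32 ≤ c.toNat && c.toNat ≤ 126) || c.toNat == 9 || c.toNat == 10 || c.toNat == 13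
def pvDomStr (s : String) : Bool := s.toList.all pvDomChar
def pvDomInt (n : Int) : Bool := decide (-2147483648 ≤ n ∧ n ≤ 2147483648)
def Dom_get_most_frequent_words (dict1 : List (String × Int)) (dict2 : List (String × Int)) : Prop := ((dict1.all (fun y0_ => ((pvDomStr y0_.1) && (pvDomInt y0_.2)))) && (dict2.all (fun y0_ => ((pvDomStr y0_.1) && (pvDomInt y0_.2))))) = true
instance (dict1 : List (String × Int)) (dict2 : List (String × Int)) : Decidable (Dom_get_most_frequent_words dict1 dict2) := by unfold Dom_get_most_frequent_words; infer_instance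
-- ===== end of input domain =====

-- B fuses A's three passes (merge dict, max of values, filter) into one scan over the union of keys
-- keeping a running best value and the tied words; same result, different decomposition.


-- ===== PORT A =====
-- body of A's first loop: freq[i] += dict2[i] if i in freq else freq[i] = dict2[i]
def pvMergeStep (d2 : PySem.Dict String Int) (f : PySem.Dict String Int) (i : String) : PySem.Dict String Int :=
  if f.contains i then f.modify i 0 (· + d2.getD i 0) else f.insert i (d2.getD i 0)

def get_most_frequent_words (dict1 : List (String × Int)) (dict2 : List (String × Int)) : List String :=
  let d1 := PySem.Dict.ofList dict1
  let d2 := PySem.Dict.ofList dict2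
  let freq := d2.keys.foldl (pvMergeStep d2) d1
  match PySem.List.max? freq.values (fun v => v) with
  | none => []   -- Python raises ValueError (max of empty sequence) here; excluded by Pre_
  | some maxValue =>
      PySem.List.sorted
        (freq.keys.foldl (fun acc i => if freq.getD i 0 = maxValue then acc ++ [i] else acc) [])
        (fun x => x) false

-- ===== PORT B =====
-- body of B's loop: running best value (None at start) and list of tied words
def pvScanStep (d1 d2 : PySem.Dict String Int) (st : Option Int × List String) (k : String) : Option Int × List String :=
  let c := d1.getD k 0 + d2.getD k 0
  match st.1 with
  | none => (some c, [k])
  | some b => if b < c then (some c, [k]) else if c = b then (st.1, st.2 ++ [k]) else st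

def get_most_frequent_words_alt (dict1 : List (String × Int)) (dict2 : List (String × Int)) : List String :=
  let d1 := PySem.Dict.ofList dict1
  let d2 := PySem.Dict.ofList dict2
  let keys := d1.keys ++ d2.keys.filter (fun k => !(d1.contains k))
  let st := keys.foldl (pvScanStep d1 d2) (none, [])
  PySem.List.sorted st.2 (fun x => x) false

-- ===== PRECONDITION & SPEC =====
-- Pre_ excludes only the input where both dicts are empty: there Python A raises ValueError (max of an empty sequence).
def Pre_get_most_frequent_words (dict1 : List (String × Int)) (dict2 : List (String × Int)) : Prop :=
  ¬ (dict1 = [] ∧ dict2 = [])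
instance (dict1 : List (String × Int)) (dict2 : List (String × Int)) : Decidable (Pre_get_most_frequent_words dict1 dict2) := by unfold Pre_get_most_frequent_words; infer_instance

def pvWitness_get_most_frequent_words : (List (String × Int)) × (List (String × Int)) :=
  ([("a", 1)], [("b", 2)])

def Spec_get_most_frequent_words (dict1 : List (String × Int)) (dict2 : List (String × Int)) (out : List String) : Prop := out = get_most_frequent_words_alt dict1 dict2
instance (dict1 : List (String × Int)) (dict2 : List (String × Int)) (out : List String) : Decidable (Spec_get_most_frequent_words dict1 dict2 out) := by unfold Spec_get_most_frequent_words; infer_instance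

-- ===== CLAIM (what is proved, stated in full; the proofs are below) =====
def Claim_equal_get_most_frequent_words : Prop := ∀ (dict1 : List (String × Int)) (dict2 : List (String × Int)), Dom_get_most_frequent_words dict1 dict2 → Pre_get_most_frequent_words dict1 dict2 → Spec_get_most_frequent_words dict1 dict2 (get_most_frequent_words dict1 dict2)

-- ===== LEMMAS AND PROOFS =====

-- keys of a dict built from a pair list are the deduped first components
theorem pv_keys_ofList (ps : List (String × Int)) :
    (PySem.Dict.ofList ps).keys = PySem.Set.ofList (ps.map (·.1)) := by
  show (List.foldl (fun acc p => acc.insert p.1 p.2) PySem.Dict.empty ps).keys = _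
  rw [show (fun (acc : PySem.Dict String Int) (p : String × Int) => acc.insert p.1 p.2)
        = (fun d x => d.insert ((·.1) x) ((fun (_ : PySem.Dict String Int) (p : String × Int) => p.2) d x)) from rfl,
      PySem.Dict.keys_foldl_insert_key]
  simp [PySem.Dict.keys]
  rfl

-- after A's merge loop, every lookup is the sum of the two lookups
theorem pv_merge_getD (d2 : PySem.Dict String Int) (l : List String) (hl : l.Nodup)
    (f : PySem.Dict String Int) (k : String) :
    (l.foldl (pvMergeStep d2) f).getD k 0
      = f.getD k 0 + (if k ∈ l then d2.getD k 0 else 0) := by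
  induction l generalizing f with
  | nil => simp
  | cons i t ih =>
    simp only [List.foldl_cons]
    rw [ih (by exact hl.of_cons)]
    have hstep : (pvMergeStep d2 f i).getD k 0
        = if k = i then f.getD i 0 + d2.getD i 0 else f.getD k 0 := by
      unfold pvMergeStep
      by_cases hc : f.contains i = true
      · simp [hc, PySem.Dict.getD_modify]
      · simp only [Bool.not_eq_true] at hc
        simp [hc, PySem.Dict.getD_insert, PySem.Dict.getD_of_not_contains f 0 hc]

    rw [hstep]
    have hnotin : i ∉ t := (List.nodup_cons.mp hl).1
    by_cases hk : k = i
    · subst hk; simp [hnotin]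
    · simp [List.mem_cons, hk]

-- the merge loop's keys are the running union
theorem pv_merge_keys (d2 : PySem.Dict String Int) (l : List String) (f : PySem.Dict String Int) :
    (l.foldl (pvMergeStep d2) f).keys = PySem.Set.update f.keys l := by
  induction l generalizing f with
  | nil => simp [PySem.Set.update]
  | cons i t ih =>
    simp only [List.foldl_cons]
    rw [ih, PySem.Set.update_cons]
    congr 1
    unfold pvMergeStep
    by_cases hc : f.contains i = true
    · rw [if_pos hc, PySem.Dict.keys_modify, PySem.Dict.keys_insert_of_contains _ _ hc,
          PySem.Set.add_eq_ite, if_pos ((PySem.Dict.contains_iff_mem_keys f i).mp hc)]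
    · simp only [Bool.not_eq_true] at hc
      rw [if_neg (by simp [hc]), PySem.Dict.keys_insert_of_not_contains _ _ hc,
          PySem.Set.add_eq_ite, if_neg (fun h => by simp [(PySem.Dict.contains_iff_mem_keys f i).mpr h] at hc)]

-- B's scan from a non-empty state: running max, and the words tied with the final max
theorem pv_scan_inv (d1 d2 : PySem.Dict String Int) (l : List String) (b : Int) (ws : List String) :
    l.foldl (pvScanStep d1 d2) (some b, ws)
      = (some (l.foldl (fun a k => max a (d1.getD k 0 + d2.getD k 0)) b),
         (if l.foldl (fun a k => max a (d1.getD k 0 + d2.getD k 0)) b = b then ws else [])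
           ++ l.filter (fun k => d1.getD k 0 + d2.getD k 0 = l.foldl (fun a k => max a (d1.getD k 0 + d2.getD k 0)) b)) := by
  induction l generalizing b ws with
  | nil => simp
  | cons k t ih =>
    have hBmax : ∀ (b : Int), b ≤ t.foldl (fun a k => max a (d1.getD k 0 + d2.getD k 0)) b := by
      intro b
      have h := (PySem.List.le_foldl_max (t.map (fun k => d1.getD k 0 + d2.getD k 0)) b).1
      rw [List.foldl_map] at h
      exact h
    simp only [List.foldl_cons]
    have hstep : pvScanStep d1 d2 (some b, ws) k
        = if b < d1.getD k 0 + d2.getD k 0 then (some (d1.getD k 0 + d2.getD k 0), [k])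
          else if d1.getD k 0 + d2.getD k 0 = b then (some b, ws ++ [k]) else (some b, ws) := by
      simp [pvScanStep]
    rw [hstep]
    by_cases h1 : b < d1.getD k 0 + d2.getD k 0
    · have hmx : max b (d1.getD k 0 + d2.getD k 0) = d1.getD k 0 + d2.getD k 0 := by omega
      rw [if_pos h1]
      simp only [hmx, ih]
      have hvkB := hBmax (d1.getD k 0 + d2.getD k 0)
      by_cases h2 : t.foldl (fun a k => max a (d1.getD k 0 + d2.getD k 0)) (d1.getD k 0 + d2.getD k 0)
                      = d1.getD k 0 + d2.getD k 0
      · simp [h2]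
        intro h; omega
      · simp [show ¬ (d1.getD k 0 + d2.getD k 0 = t.foldl (fun a k => max a (d1.getD k 0 + d2.getD k 0)) (d1.getD k 0 + d2.getD k 0)) from fun h => h2 h.symm]
        rw [if_neg h2, if_neg (by omega)]
    · have hmx : max b (d1.getD k 0 + d2.getD k 0) = b := by omega
      have hbB := hBmax b
      by_cases h2 : d1.getD k 0 + d2.getD k 0 = b
      · rw [if_neg h1, if_pos h2]
        simp only [hmx, ih]
        by_cases h3 : t.foldl (fun a k => max a (d1.getD k 0 + d2.getD k 0)) b = b
        · simp [h2, h3]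
        · simp [h3, show ¬ (d1.getD k 0 + d2.getD k 0 = t.foldl (fun a k => max a (d1.getD k 0 + d2.getD k 0)) b) from by omega]
      · rw [if_neg h1, if_neg h2]
        simp only [hmx, ih]
        have : ¬ (d1.getD k 0 + d2.getD k 0 = t.foldl (fun a k => max a (d1.getD k 0 + d2.getD k 0)) b) := by omega
        by_cases h3 : t.foldl (fun a k => max a (d1.getD k 0 + d2.getD k 0)) b = b
        · simp [h3]
          rw [List.filter_cons_of_neg (by simpa using h2)]
        · simp [this, h3]

-- main equivalence, assembled
theorem pv_main (dict1 dict2 : List (String × Int)) (hpre : ¬ (dict1 = [] ∧ dict2 = [])) :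
    get_most_frequent_words dict1 dict2 = get_most_frequent_words_alt dict1 dict2 := by
  simp only [get_most_frequent_words, get_most_frequent_words_alt]
  set d1 := PySem.Dict.ofList dict1 with hd1
  set d2 := PySem.Dict.ofList dict2 with hd2
  set freq := d2.keys.foldl (pvMergeStep d2) d1 with hfreq
  -- lookups in freq are the sums
  have hv : ∀ k, freq.getD k 0 = d1.getD k 0 + d2.getD k 0 := by
    intro k
    rw [hfreq, pv_merge_getD d2 d2.keys (PySem.Dict.nodup_keys_ofList dict2) d1 k]
    by_cases hk : k ∈ d2.keys
    · simp [hk]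
    · have : d2.contains k = false := by
        rw [← Bool.not_eq_true]; exact fun h => hk ((PySem.Dict.contains_iff_mem_keys d2 k).mp h)
      simp [hk, PySem.Dict.getD_of_not_contains d2 0 this]
  -- the key lists coincide
  have hcont : ∀ y, PySem.Set.contains d1.keys y = d1.contains y := by
    intro y
    rw [PySem.Set.contains_eq_listContains, PySem.Dict.contains_eq_decide_mem_keys]
    simp
  have hkeys : freq.keys = d1.keys ++ d2.keys.filter (fun k => !(d1.contains k)) := by
    rw [hfreq, pv_merge_keys, PySem.Set.update_eq_append_filter,
        PySem.Set.ofList_eq_self_of_nodup d2.keys (PySem.Dict.nodup_keys_ofList dict2)]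
    congr 1
    exact List.filter_congr (fun y _ => by rw [hcont y])
  have hnodup : freq.keys.Nodup := by
    rw [hfreq, pv_merge_keys]
    exact PySem.Set.nodup_update _ _ (PySem.Dict.nodup_keys_ofList dict1)
  have hne : freq.keys ≠ [] := by
    rw [hkeys]
    by_cases hD : dict1 = []
    · have h2 : dict2 ≠ [] := fun h => hpre ⟨hD, h⟩
      obtain ⟨q, s, hqs⟩ := List.exists_cons_of_ne_nil h2
      have hq : q.1 ∈ d2.keys := by
        rw [hd2, hqs, pv_keys_ofList]
        exact (PySem.Set.mem_ofList _ _).mpr (by simp)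
      have hc : d1.contains q.1 = false := by
        rw [hd1, hD]; exact PySem.Dict.contains_empty q.1
      intro h
      rw [List.append_eq_nil_iff] at h
      have hmem : q.1 ∈ d2.keys.filter (fun k => !(d1.contains k)) := by
        simp [List.mem_filter, hq, hc]
      rw [h.2] at hmem
      exact absurd hmem (List.not_mem_nil)
    · obtain ⟨p, t, hpt⟩ := List.exists_cons_of_ne_nil hD
      have hp : p.1 ∈ d1.keys := by
        rw [hd1, hpt, pv_keys_ofList]
        exact (PySem.Set.mem_ofList _ _).mpr (by simp)
      intro h
      rw [List.append_eq_nil_iff] at h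
      rw [h.1] at hp
      exact absurd hp (List.not_mem_nil)
  obtain ⟨k0, rest, hK⟩ := List.exists_cons_of_ne_nil hne
  have hvals : freq.values = freq.keys.map (fun k => d1.getD k 0 + d2.getD k 0) := by
    rw [PySem.Dict.values_eq_map_keys freq hnodup 0]
    exact List.map_congr_left (fun k _ => hv k)
  have hmax : PySem.List.max? freq.values (fun x => x)
      = some (rest.foldl (fun a k => max a (d1.getD k 0 + d2.getD k 0)) (d1.getD k0 0 + d2.getD k0 0)) := by
    rw [hvals, hK, List.map_cons, PySem.List.max?_id_cons, List.foldl_map]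
  simp only [hmax]
  have h0 : pvScanStep d1 d2 (none, []) k0 = (some (d1.getD k0 0 + d2.getD k0 0), [k0]) := by
    simp [pvScanStep]
  conv_rhs => rw [← hkeys, hK, List.foldl_cons, h0, pv_scan_inv]
  rw [hK]
  have hfoldA : (k0 :: rest).foldl
        (fun acc i => if freq.getD i 0 = rest.foldl (fun a k => max a (d1.getD k 0 + d2.getD k 0)) (d1.getD k0 0 + d2.getD k0 0) then acc ++ [i] else acc) []
      = (k0 :: rest).filter (fun k => decide (d1.getD k 0 + d2.getD k 0 = rest.foldl (fun a k => max a (d1.getD k 0 + d2.getD k 0)) (d1.getD k0 0 + d2.getD k0 0))) := by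
    have hfun : (fun (acc : List String) i => if freq.getD i 0 = rest.foldl (fun a k => max a (d1.getD k 0 + d2.getD k 0)) (d1.getD k0 0 + d2.getD k0 0) then acc ++ [i] else acc)
        = (fun acc i => if (fun j => decide (d1.getD j 0 + d2.getD j 0 = rest.foldl (fun a k => max a (d1.getD k 0 + d2.getD k 0)) (d1.getD k0 0 + d2.getD k0 0))) i = true then acc ++ [(fun x => x) i] else acc) := by
      funext acc i
      simp [hv i]
    rw [hfun, PySem.List.foldl_append_if]
    simp
  rw [hfoldA]
  congr 1
  rw [List.filter_cons]
  by_cases hk0 : d1.getD k0 0 + d2.getD k0 0 = rest.foldl (fun a k => max a (d1.getD k 0 + d2.getD k 0)) (d1.getD k0 0 + d2.getD k0 0)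
  · rw [if_pos (by simpa using hk0), if_pos hk0.symm]
    simp
  · rw [if_neg (by simpa using hk0), if_neg (fun h => hk0 h.symm)]
    simp

-- ===== VERDICT (by name: the statement is the Claim_ definition above) =====
theorem get_most_frequent_words_spec : Claim_equal_get_most_frequent_words := by
  intro dict1 dict2 _ hpre
  unfold Spec_get_most_frequent_words
  exact pv_main dict1 dict2 hpre
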